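-- pv_equiv track=rewrite | github.com/paullu-ualberta/Rabin.Fingerprint | Alpha/rabin_fingerprint.py | compute_incoming_table3_3
-- ===== SOURCE A (Python) =====
-- def compute_incoming_table3_3(irreducible, step_size):
--     table = [0]
--     rshift = irreducible.bit_length() - 1
--     mask1 = (1 << rshift) - 1
--     for bits in range(1, 2 ** step_size):
--         bits <<= rshift
--         b_len = bits.bit_length() - irreducible.bit_length()
--         irreducible2 = irreducible << b_len
--         mask2 = 1 << (bits.bit_length() - 1)
--         for i in range(b_len + 1):
--             if mask2 & bits > 0:
--                 bits ^= irreducible2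
--             s = bits >> rshift
--             if s < len(table):
--                 table.append(bits & mask1 ^ table[s])
--                 break
--             mask2 >>= 1
--             irreducible2 >>= 1
--
--     return table
-- ===== SOURCE B (Python) =====
-- def compute_incoming_table3_3(irreducible, step_size):
--     rshift = irreducible.bit_length() - 1
--     top = 1 << rshift
--     mask1 = top - 1
--     lowrow = irreducible & mask1
--     table = [0]
--     for n in range(1, 2 ** step_size):
--         t = table[n >> 1] << 1
--         if t & top:
--             t ^= irreducible
--         if n & 1:
--             t ^= lowrow
--         table.append(t)
--     return table
-- ===== Notes on version B (the rewrite author's own statement) =====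
-- stated objective: faster
-- what changed: A reduces each row n<<rshift bit by bit in an inner scan (O(2^s * s) big-int steps); B exploits GF(2) linearity and builds each entry in O(1) from already-computed rows: table[n] = reduce(table[n>>1] << 1) ^ (n&1)*(irreducible & mask).
-- outside the precondition, e.g. on compute_incoming_table3_3(-3, 2): A returns [0, 1, 1, 1], B returns [0, 1, -1, -2]
import Mathlib
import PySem

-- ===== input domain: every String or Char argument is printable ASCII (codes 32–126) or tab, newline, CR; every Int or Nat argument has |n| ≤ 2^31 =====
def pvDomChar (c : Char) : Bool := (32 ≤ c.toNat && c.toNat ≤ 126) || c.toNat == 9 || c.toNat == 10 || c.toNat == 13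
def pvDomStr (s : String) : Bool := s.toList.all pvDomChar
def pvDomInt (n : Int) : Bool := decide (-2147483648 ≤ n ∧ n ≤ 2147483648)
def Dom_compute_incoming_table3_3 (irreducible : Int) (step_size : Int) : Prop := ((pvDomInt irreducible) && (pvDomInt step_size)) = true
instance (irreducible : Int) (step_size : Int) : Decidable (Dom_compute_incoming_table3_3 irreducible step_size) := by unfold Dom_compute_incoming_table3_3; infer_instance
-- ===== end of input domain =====

-- B replaces A's per-entry bit-by-bit reduction loop with the GF(2)-linear recurrence
-- table[n] = reduce(table[n >> 1] << 1) ^ (n & 1) * (irreducible & mask): one constant-time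
-- step per entry instead of an inner scan (objective: faster).

-- ===== PORT A =====
-- inner 'for i in range(b_len + 1): …' loop of A; fuel counts the remaining iterations,
-- running out of fuel without the break leaves the table unchanged, exactly as in Python.
def pvInnerA (rshift : Nat) (mask1 : Int) : Nat → Int → Int → Int → List Int → List Int
  | 0, _, _, _, table => table
  | fuel+1, bits, mask2, irr2, table =>
      let bits1 := if 0 < PySem.Int.band mask2 bits then PySem.Int.bxor bits irr2 else bits
      let s := bits1 >>> rshift
      if s < (table.length : Int) then
        -- table[s]: inside Pre_ we always have 0 ≤ s here, so pyGetD is Python-exact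
        table ++ [PySem.Int.bxor (PySem.Int.band bits1 mask1) (PySem.List.pyGetD table s 0)]
      else pvInnerA rshift mask1 fuel bits1 (mask2 >>> (1 : Nat)) (irr2 >>> (1 : Nat)) table

def compute_incoming_table3_3 (irreducible : Int) (step_size : Int) : List Int :=
  -- rshift = irreducible.bit_length() - 1 : inside Pre_ (irreducible ≥ 1) this Python value is ≥ 0,
  -- so the Nat subtraction is exact; likewise 2 ** step_size = 2 ^ step_size.toNat for step_size ≥ 0,
  -- and b_len = bits.bit_length() - irreducible.bit_length() ≥ 0 for bits = n << rshift, n ≥ 1.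
  let rshift : Nat := PySem.Int.bitLength irreducible - 1
  let mask1 : Int := ((1 : Int) <<< rshift) - 1
  (PySem.List.pyRange 1 ((2 : Int) ^ step_size.toNat) 1).foldl
    (fun (table : List Int) (bits0 : Int) =>
      let bits : Int := bits0 <<< rshift
      let b_len : Nat := PySem.Int.bitLength bits - PySem.Int.bitLength irreducible
      let irr2 : Int := irreducible <<< b_len
      let mask2 : Int := (1 : Int) <<< (PySem.Int.bitLength bits - 1)
      pvInnerA rshift mask1 (b_len + 1) bits mask2 irr2 table)
    [0]

-- ===== PORT B =====
def compute_incoming_table3_3_alt (irreducible : Int) (step_size : Int) : List Int :=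
  let rshift : Nat := PySem.Int.bitLength irreducible - 1
  let top : Int := (1 : Int) <<< rshift
  let mask1 : Int := top - 1
  let lowrow : Int := PySem.Int.band irreducible mask1
  (PySem.List.pyRange 1 ((2 : Int) ^ step_size.toNat) 1).foldl
    (fun (table : List Int) (n : Int) =>
      let t0 : Int := (PySem.List.pyGetD table (n >>> (1 : Nat)) 0) <<< (1 : Nat)
      let t1 : Int := if PySem.Int.band t0 top ≠ 0 then PySem.Int.bxor t0 irreducible else t0
      let t2 : Int := if PySem.Int.band n 1 ≠ 0 then PySem.Int.bxor t1 lowrow else t1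
      table ++ [t2])
    [0]

-- ===== PRECONDITION & SPEC =====
-- Pre_ excludes step_size < 0 and irreducible ≤ 0: there A raises (TypeError / ValueError /
-- IndexError) or — for negative non-power-of-two irreducible — returns values that are an
-- accident of Python's negative-index list wraparound, no part of the table being built.
def Pre_compute_incoming_table3_3 (irreducible : Int) (step_size : Int) : Prop :=
  1 ≤ irreducible ∧ 0 ≤ step_size
instance (irreducible : Int) (step_size : Int) : Decidable (Pre_compute_incoming_table3_3 irreducible step_size) := by unfold Pre_compute_incoming_table3_3; infer_instance

def pvWitness_compute_incoming_table3_3 : Int × Int := (283, 3)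

def Spec_compute_incoming_table3_3 (irreducible : Int) (step_size : Int) (out : List Int) : Prop := out = compute_incoming_table3_3_alt irreducible step_size
instance (irreducible : Int) (step_size : Int) (out : List Int) : Decidable (Spec_compute_incoming_table3_3 irreducible step_size out) := by unfold Spec_compute_incoming_table3_3; infer_instance

-- ===== CLAIM (what is proved, stated in full; the proofs are below) =====
def Claim_equal_compute_incoming_table3_3 : Prop := ∀ (irreducible : Int) (step_size : Int), Dom_compute_incoming_table3_3 irreducible step_size → Pre_compute_incoming_table3_3 irreducible step_size → Spec_compute_incoming_table3_3 irreducible step_size (compute_incoming_table3_3 irreducible step_size)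

-- ===== LEMMAS AND PROOFS =====

-- Python's bit_length on a natural number.
def pvBL (n : Nat) : Nat := PySem.Int.bitLength (n : Int)

theorem pvBL_lt (n : Nat) : n < 2 ^ pvBL n := by
  simpa [pvBL] using PySem.Int.lt_two_pow_bitLength (n : Int)

theorem pvBL_le {n : Nat} (h : n ≠ 0) : 2 ^ (pvBL n - 1) ≤ n := by
  simpa [pvBL] using PySem.Int.two_pow_bitLength_le (n : Int) (by exact_mod_cast h)

theorem pvBL_pos {n : Nat} (h : n ≠ 0) : 1 ≤ pvBL n := by
  by_contra hc
  have h0 : pvBL n = 0 := by omega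
  have := pvBL_lt n
  rw [h0] at this
  omega

theorem pvBL_eq {n m : Nat} (h1 : 2 ^ m ≤ n) (h2 : n < 2 ^ (m + 1)) : pvBL n = m + 1 := by
  have hn : n ≠ 0 := by have := Nat.two_pow_pos m; omega
  have hlt := pvBL_lt n
  have hle := pvBL_le hn
  have hpos := pvBL_pos hn
  have e1 : m < pvBL n := by
    have : (2 : Nat) ^ m < 2 ^ pvBL n := by omega
    exact (Nat.pow_lt_pow_iff_right (by norm_num)).mp this
  have e2 : pvBL n - 1 < m + 1 := by
    have : (2 : Nat) ^ (pvBL n - 1) < 2 ^ (m + 1) := by omega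
    exact (Nat.pow_lt_pow_iff_right (by norm_num)).mp this
  omega

theorem pvBL_mul_pow {n : Nat} (h : n ≠ 0) (k : Nat) : pvBL (n * 2 ^ k) = pvBL n + k := by
  have hpos := pvBL_pos h
  have hle := pvBL_le h
  have hlt := pvBL_lt n
  have h1 : 2 ^ (pvBL n - 1 + k) ≤ n * 2 ^ k := by
    rw [Nat.pow_add]; exact Nat.mul_le_mul_right _ hle
  have h2 : n * 2 ^ k < 2 ^ (pvBL n + k) := by
    rw [Nat.pow_add]; exact (Nat.mul_lt_mul_right (Nat.two_pow_pos k)).mpr hlt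
  have := pvBL_eq h1 (by rw [show pvBL n - 1 + k + 1 = pvBL n + k by omega]; exact h2)
  omega

-- top-bit cancellation of xor
theorem pv_xor_top_cancel {a b m : Nat} (ha1 : 2 ^ m ≤ a) (ha2 : a < 2 ^ (m + 1))
    (hb1 : 2 ^ m ≤ b) (hb2 : b < 2 ^ (m + 1)) : a ^^^ b < 2 ^ m := by
  apply Nat.lt_pow_two_of_testBit
  intro i hi
  rcases Nat.eq_or_lt_of_le hi with rfl | hlt
  · rw [Nat.testBit_xor,
      Nat.testBit_of_two_pow_le_and_two_pow_add_one_gt ha1 ha2,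
      Nat.testBit_of_two_pow_le_and_two_pow_add_one_gt hb1 hb2]
    rfl
  · have hia : a < 2 ^ i := lt_of_lt_of_le ha2 (Nat.pow_le_pow_right (by norm_num) hlt)
    have hib : b < 2 ^ i := lt_of_lt_of_le hb2 (Nat.pow_le_pow_right (by norm_num) hlt)
    rw [Nat.testBit_xor, Nat.testBit_lt_two_pow hia, Nat.testBit_lt_two_pow hib]
    rfl

theorem pv_testBit_false_lt {x m : Nat} (h1 : x < 2 ^ (m + 1)) (h2 : x.testBit m = false) :
    x < 2 ^ m := by
  apply Nat.lt_pow_two_of_testBit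
  intro i hi
  rcases Nat.eq_or_lt_of_le hi with rfl | hlt
  · exact h2
  · exact Nat.testBit_lt_two_pow (lt_of_lt_of_le h1 (Nat.pow_le_pow_right (by norm_num) hlt))

theorem pv_shl_xor_low {b i : Nat} (hb : b < 2 ^ i) (a : Nat) :
    a <<< i ^^^ b = a <<< i + b := by
  rw [Nat.shiftLeft_add_eq_or_of_lt hb a]
  apply Nat.eq_of_testBit_eq
  intro j
  rw [Nat.testBit_xor, Nat.testBit_or]
  by_cases hj : j < i
  · have : (a <<< i).testBit j = false := by
      simp [Nat.testBit_shiftLeft, Nat.not_le.mpr hj]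
    rw [this]; cases b.testBit j <;> rfl
  · have : b.testBit j = false :=
      Nat.testBit_lt_two_pow (lt_of_lt_of_le hb (Nat.pow_le_pow_right (by norm_num) (by omega)))
    rw [this]; cases (a <<< i).testBit j <;> rfl

theorem pv_and_two_pow_pos_iff (x m : Nat) : 0 < x &&& 2 ^ m ↔ x.testBit m = true := by
  rw [Nat.and_two_pow]
  cases x.testBit m
  · simp
  · simp [Nat.two_pow_pos m]

-- GF(2) polynomial remainder by repeated top-bit elimination (A's inner loop in closed form).
def pvPM (P d x : Nat) : Nat :=
  if x < 2 ^ d then x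
  else
    if _h : x ^^^ (P <<< (pvBL x - (d + 1))) < x then
      pvPM P d (x ^^^ (P <<< (pvBL x - (d + 1))))
    else x
termination_by x

theorem pvPM_small {P d x : Nat} (h : x < 2 ^ d) : pvPM P d x = x := by
  rw [pvPM]; simp [h]

theorem pvPM_progress {P d x : Nat} (h1 : 2 ^ d ≤ P) (h2 : P < 2 ^ (d + 1))
    (hx : ¬ x < 2 ^ d) : x ^^^ (P <<< (pvBL x - (d + 1))) < x := by
  have hP0 : P ≠ 0 := by have := Nat.two_pow_pos d; omega
  have hx0 : x ≠ 0 := by have := Nat.two_pow_pos d; omega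
  have hBLP : pvBL P = d + 1 := pvBL_eq h1 h2
  have hdlt : d + 1 ≤ pvBL x := by
    have : (2 : Nat) ^ d < 2 ^ pvBL x := lt_of_le_of_lt (by omega) (pvBL_lt x)
    have := (Nat.pow_lt_pow_iff_right (by norm_num : (1:Nat) < 2)).mp this
    omega
  set k := pvBL x - (d + 1) with hk
  have hshift : P <<< k = P * 2 ^ k := Nat.shiftLeft_eq P k
  have hBLs : pvBL (P * 2 ^ k) = pvBL x := by
    rw [pvBL_mul_pow hP0 k, hBLP]; omega
  have hxpos := pvBL_pos hx0
  have hcancel : x ^^^ (P * 2 ^ k) < 2 ^ (pvBL x - 1) := by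
    apply pv_xor_top_cancel (pvBL_le hx0) _ _ _
    · rw [show pvBL x - 1 + 1 = pvBL x by omega]; exact pvBL_lt x
    · rw [← hBLs]; exact pvBL_le (by positivity)
    · rw [show pvBL x - 1 + 1 = pvBL x by omega, ← hBLs]; exact pvBL_lt _
  rw [hshift]
  exact lt_of_lt_of_le hcancel (pvBL_le hx0)

theorem pvPM_step {P d x : Nat} (h1 : 2 ^ d ≤ P) (h2 : P < 2 ^ (d + 1)) (hx : ¬ x < 2 ^ d) :
    pvPM P d x = pvPM P d (x ^^^ (P <<< (pvBL x - (d + 1)))) := by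
  rw [pvPM]; simp [hx, pvPM_progress h1 h2 hx]

theorem pvPM_lt {P d : Nat} (h1 : 2 ^ d ≤ P) (h2 : P < 2 ^ (d + 1)) (x : Nat) :
    pvPM P d x < 2 ^ d := by
  induction x using Nat.strong_induction_on with
  | _ x ih =>
    by_cases hx : x < 2 ^ d
    · rw [pvPM_small hx]; exact hx
    · rw [pvPM_step h1 h2 hx]; exact ih _ (pvPM_progress h1 h2 hx)

theorem pvPM_xor_shift {P d : Nat} (h1 : 2 ^ d ≤ P) (h2 : P < 2 ^ (d + 1)) (x k : Nat) :
    pvPM P d (x ^^^ (P <<< k)) = pvPM P d x := by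
  have hP0 : P ≠ 0 := by have := Nat.two_pow_pos d; omega
  have hBLP : pvBL P = d + 1 := pvBL_eq h1 h2
  induction x using Nat.strong_induction_on generalizing k with
  | _ x ih =>
    have hsh : P <<< k = P * 2 ^ k := Nat.shiftLeft_eq P k
    have hBLs : pvBL (P <<< k) = k + d + 1 := by
      rw [hsh, pvBL_mul_pow hP0 k, hBLP]; omega
    have hs_le : 2 ^ (k + d) ≤ P <<< k := by
      have := pvBL_le (n := P <<< k) (by rw [hsh]; positivity)
      rwa [hBLs, Nat.add_sub_cancel] at this
    have hs_lt : P <<< k < 2 ^ (k + d + 1) := by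
      have := pvBL_lt (P <<< k); rwa [hBLs] at this
    rcases Nat.lt_trichotomy (pvBL x) (k + d + 1) with hc | hc | hc
    · -- x below the shifted row: the xor has top bit k+d, one pvPM step removes it
      have hxlt : x < 2 ^ (k + d) :=
        lt_of_lt_of_le (pvBL_lt x) (Nat.pow_le_pow_right (by norm_num) (by omega))
      set w := x ^^^ P <<< k with hw
      have hwtop : w.testBit (k + d) = true := by
        rw [hw, Nat.testBit_xor, Nat.testBit_lt_two_pow hxlt,
          Nat.testBit_of_two_pow_le_and_two_pow_add_one_gt hs_le hs_lt]
        rfl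
      have hwlt : w < 2 ^ (k + d + 1) := Nat.xor_lt_two_pow
        (lt_of_lt_of_le hxlt (Nat.pow_le_pow_right (by norm_num) (by omega))) hs_lt
      have hwge : 2 ^ (k + d) ≤ w := Nat.ge_two_pow_of_testBit hwtop
      have hBLw : pvBL w = k + d + 1 := pvBL_eq hwge hwlt
      have hnots : ¬ w < 2 ^ d := by
        have : (2:Nat) ^ d ≤ 2 ^ (k + d) := Nat.pow_le_pow_right (by norm_num) (by omega)
        omega
      rw [pvPM_step h1 h2 hnots, hBLw]
      rw [show k + d + 1 - (d + 1) = k by omega]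
      rw [hw, Nat.xor_assoc, Nat.xor_self, Nat.xor_zero]
    · -- same bit length: this is exactly pvPM's own step on x
      have hx0 : x ≠ 0 := by
        intro h0; rw [h0] at hc; simp [pvBL] at hc
      have hxge : 2 ^ (k + d) ≤ x := by
        have := pvBL_le hx0; rw [hc] at this; simpa using this
      have hnotx : ¬ x < 2 ^ d := by
        have : (2:Nat) ^ d ≤ 2 ^ (k + d) := Nat.pow_le_pow_right (by norm_num) (by omega)
        omega
      rw [pvPM_step h1 h2 hnotx, hc]
      rw [show k + d + 1 - (d + 1) = k by omega]
    · -- x longer than the shifted row: reduce x's own top bit on both sides, recurse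
      have hx0 : x ≠ 0 := by
        intro h0; rw [h0] at hc; simp [pvBL] at hc
      set m := pvBL x - 1 with hm
      have hxpos := pvBL_pos hx0
      have hxge : 2 ^ m ≤ x := pvBL_le hx0
      have hxlt : x < 2 ^ (m + 1) := by
        rw [show m + 1 = pvBL x by omega]; exact pvBL_lt x
      set k' := pvBL x - (d + 1) with hk'
      have hnotx : ¬ x < 2 ^ d := by
        have : (2:Nat) ^ d ≤ 2 ^ m := Nat.pow_le_pow_right (by norm_num) (by omega)
        omega
      have hx' : x ^^^ P <<< k' < x := pvPM_progress h1 h2 hnotx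
      -- w = x ^^^ P<<<k has the same top bit as x
      set w := x ^^^ P <<< k with hw
      have hslt : P <<< k < 2 ^ m :=
        lt_of_lt_of_le hs_lt (Nat.pow_le_pow_right (by norm_num) (by omega))
      have hwtop : w.testBit m = true := by
        rw [hw, Nat.testBit_xor, Nat.testBit_lt_two_pow hslt,
          Nat.testBit_of_two_pow_le_and_two_pow_add_one_gt hxge hxlt]
        rfl
      have hwge : 2 ^ m ≤ w := Nat.ge_two_pow_of_testBit hwtop
      have hwlt : w < 2 ^ (m + 1) := Nat.xor_lt_two_pow hxlt
        (lt_of_lt_of_le hslt (Nat.pow_le_pow_right (by norm_num) (by omega)))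
      have hBLw : pvBL w = m + 1 := pvBL_eq hwge hwlt
      have hnotw : ¬ w < 2 ^ d := by
        have : (2:Nat) ^ d ≤ 2 ^ m := Nat.pow_le_pow_right (by norm_num) (by omega)
        omega
      have hkk : m + 1 - (d + 1) = k' := by omega
      rw [pvPM_step h1 h2 hnotw, hBLw, hkk]
      have hre : w ^^^ P <<< k' = (x ^^^ P <<< k') ^^^ P <<< k := by
        rw [hw, Nat.xor_assoc, Nat.xor_assoc, Nat.xor_comm (P <<< k)]
      rw [hre, ih _ hx' k, pvPM_step h1 h2 hnotx]

theorem pvPM_xor_left {P d : Nat} (h1 : 2 ^ d ≤ P) (h2 : P < 2 ^ (d + 1)) (a b : Nat) :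
    pvPM P d (a ^^^ b) = pvPM P d (pvPM P d a ^^^ b) := by
  induction a using Nat.strong_induction_on generalizing b with
  | _ a ih =>
    by_cases ha : a < 2 ^ d
    · rw [pvPM_small ha]
    · set k := pvBL a - (d + 1) with hk
      have hprog : a ^^^ P <<< k < a := pvPM_progress h1 h2 ha
      have hsplit : a ^^^ b = ((a ^^^ P <<< k) ^^^ b) ^^^ P <<< k := by
        apply Nat.eq_of_testBit_eq; intro i
        simp only [Nat.testBit_xor]
        cases a.testBit i <;> cases b.testBit i <;> cases (P <<< k).testBit i <;> rfl
      rw [hsplit, pvPM_xor_shift h1 h2, ih _ hprog b, ← pvPM_step h1 h2 ha]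

theorem pv_two_mul_xor (u v : Nat) : 2 * (u ^^^ v) = 2 * u ^^^ 2 * v := by
  have := Nat.shiftLeft_xor_distrib (a := u) (b := v) (i := 1)
  simpa [Nat.shiftLeft_eq, Nat.mul_comm] using this

theorem pvPM_two_mul {P d : Nat} (h1 : 2 ^ d ≤ P) (h2 : P < 2 ^ (d + 1)) (x : Nat) :
    pvPM P d (2 * x) = pvPM P d (2 * pvPM P d x) := by
  induction x using Nat.strong_induction_on with
  | _ x ih =>
    by_cases hx : x < 2 ^ d
    · rw [pvPM_small hx]
    · set k := pvBL x - (d + 1) with hk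
      have hprog : x ^^^ P <<< k < x := pvPM_progress h1 h2 hx
      have hdist : 2 * (x ^^^ P <<< k) = 2 * x ^^^ P <<< (k + 1) := by
        rw [pv_two_mul_xor]
        congr 1
        rw [Nat.shiftLeft_eq, Nat.shiftLeft_eq, Nat.pow_succ]
        ring
      have : pvPM P d (2 * x) = pvPM P d (2 * (x ^^^ P <<< k)) := by
        rw [hdist, pvPM_xor_shift h1 h2]
      rw [this, ih _ hprog, ← pvPM_step h1 h2 hx]

-- the table entry: pvF P d n = (n << d) mod P over GF(2)
def pvF (P d n : Nat) : Nat := pvPM P d (n * 2 ^ d)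

theorem pvF_zero (P d : Nat) : pvF P d 0 = 0 := by
  simp [pvF, pvPM_small (Nat.two_pow_pos d)]

theorem pvP_decomp {P d : Nat} (h1 : 2 ^ d ≤ P) (h2 : P < 2 ^ (d + 1)) :
    P = 2 ^ d ^^^ P % 2 ^ d := by
  have hmod : P % 2 ^ d < 2 ^ d := Nat.mod_lt _ (Nat.two_pow_pos d)
  have := pv_shl_xor_low hmod 1
  rw [Nat.shiftLeft_eq, Nat.one_mul] at this
  rw [this]
  have hdiv : P / 2 ^ d = 1 := by
    apply Nat.div_eq_of_lt_le (by omega)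
    rw [Nat.pow_succ] at h2
    omega
  conv_lhs => rw [← Nat.div_add_mod P (2 ^ d), hdiv, Nat.mul_one]

theorem pvPM_double_ge {P d t : Nat} (h1 : 2 ^ d ≤ P) (h2 : P < 2 ^ (d + 1))
    (ht : t < 2 ^ d) (hge : 2 ^ d ≤ 2 * t) : pvPM P d (2 * t) = (2 * t) ^^^ P := by
  have hlt : 2 * t < 2 ^ (d + 1) := by rw [Nat.pow_succ]; omega
  have hBL : pvBL (2 * t) = d + 1 := pvBL_eq hge hlt
  rw [pvPM_step h1 h2 (by omega), hBL, Nat.sub_self, Nat.shiftLeft_zero]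
  exact pvPM_small (pv_xor_top_cancel hge hlt h1 h2)

theorem pvPM_xor_two_pow {P d t : Nat} (h1 : 2 ^ d ≤ P) (h2 : P < 2 ^ (d + 1))
    (ht : t < 2 ^ d) : pvPM P d (t ^^^ 2 ^ d) = t ^^^ P % 2 ^ d := by
  have hx : t ^^^ 2 ^ d = 2 ^ d + t := by
    have := pv_shl_xor_low ht 1
    rw [Nat.shiftLeft_eq, Nat.one_mul] at this
    rw [Nat.xor_comm]; exact this
  have hge : 2 ^ d ≤ t ^^^ 2 ^ d := by omega
  have hlt : t ^^^ 2 ^ d < 2 ^ (d + 1) := by rw [Nat.pow_succ]; omega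
  have hBL : pvBL (t ^^^ 2 ^ d) = d + 1 := pvBL_eq hge hlt
  rw [pvPM_step h1 h2 (by omega), hBL, Nat.sub_self, Nat.shiftLeft_zero]
  have hre : t ^^^ 2 ^ d ^^^ P = t ^^^ P % 2 ^ d := by
    conv_lhs => rw [pvP_decomp h1 h2]
    rw [Nat.xor_assoc]
    congr 1
    rw [← Nat.xor_assoc, Nat.xor_self, Nat.zero_xor]
  rw [hre]
  exact pvPM_small (Nat.xor_lt_two_pow ht (Nat.mod_lt _ (Nat.two_pow_pos d)))

-- B's recurrence computes pvF
theorem pvF_rec {P d : Nat} (h1 : 2 ^ d ≤ P) (h2 : P < 2 ^ (d + 1)) (n : Nat) :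
    pvF P d n =
      (let t0 := 2 * pvF P d (n / 2)
       let t1 := if 2 ^ d ≤ t0 then t0 ^^^ P else t0
       if n % 2 = 1 then t1 ^^^ P % 2 ^ d else t1) := by
  have hfm : pvF P d (n / 2) < 2 ^ d := pvPM_lt h1 h2 _
  set t0 := 2 * pvF P d (n / 2) with ht0
  -- n * 2^d = (n/2) << (d+1)  ^^^  (n%2) * 2^d
  have hmod2 : n % 2 < 2 := Nat.mod_lt _ (by norm_num)
  have hblow : n % 2 * 2 ^ d < 2 ^ (d + 1) := by
    rw [Nat.pow_succ]
    have : n % 2 * 2 ^ d ≤ 1 * 2 ^ d := Nat.mul_le_mul_right _ (by omega)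
    omega
  have hsplit : n * 2 ^ d = (n / 2) <<< (d + 1) ^^^ n % 2 * 2 ^ d := by
    rw [pv_shl_xor_low hblow, Nat.shiftLeft_eq]
    conv_lhs => rw [← Nat.div_add_mod n 2]
    ring
  have hstep1 : pvPM P d ((n / 2) <<< (d + 1)) = (if 2 ^ d ≤ t0 then t0 ^^^ P else t0) := by
    have he : (n / 2) <<< (d + 1) = 2 * (n / 2 * 2 ^ d) := by
      rw [Nat.shiftLeft_eq, Nat.pow_succ]; ring
    have hpvf : pvPM P d (n / 2 * 2 ^ d) = pvF P d (n / 2) := rfl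
    rw [he, pvPM_two_mul h1 h2, hpvf]
    by_cases hge : 2 ^ d ≤ t0
    · rw [if_pos hge, ht0, pvPM_double_ge h1 h2 hfm (ht0 ▸ hge)]
    · rw [if_neg hge, ht0, pvPM_small (by omega)]
  have ht1lt : (if 2 ^ d ≤ t0 then t0 ^^^ P else t0) < 2 ^ d := by
    rw [← hstep1]; exact pvPM_lt h1 h2 _
  rw [pvF, hsplit, pvPM_xor_left h1 h2, hstep1]
  by_cases hpar : n % 2 = 1
  · rw [if_pos hpar, hpar]
    simp only [Nat.one_mul]
    exact pvPM_xor_two_pow h1 h2 ht1lt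
  · rw [if_neg hpar]
    have h0 : n % 2 = 0 := by omega
    rw [h0]
    simp only [Nat.zero_mul, Nat.xor_zero]
    exact pvPM_small ht1lt

-- Nat-level mirror of A's inner loop
def pvInnerN (rsh mask1 : Nat) : Nat → Nat → Nat → Nat → List Nat → List Nat
  | 0, _, _, _, tbl => tbl
  | fuel+1, bits, mask2, irr2, tbl =>
      let bits1 := if 0 < mask2 &&& bits then bits ^^^ irr2 else bits
      let s := bits1 >>> rsh
      if s < tbl.length then tbl ++ [(bits1 &&& mask1) ^^^ tbl.getD s 0]
      else pvInnerN rsh mask1 fuel bits1 (mask2 >>> 1) (irr2 >>> 1) tbl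

theorem pvInnerA_bridge (rsh mask1 : Nat) :
    ∀ (fuel bits mask2 irr2 : Nat) (tbl : List Nat),
      pvInnerA rsh (mask1 : Int) fuel (bits : Int) (mask2 : Int) (irr2 : Int)
          (tbl.map (fun (x : Nat) => (x : Int)))
        = (pvInnerN rsh mask1 fuel bits mask2 irr2 tbl).map (fun (x : Nat) => (x : Int)) := by
  intro fuel
  induction fuel with
  | zero => intro bits mask2 irr2 tbl; rfl
  | succ fuel ih =>
    intro bits mask2 irr2 tbl
    rw [pvInnerA, pvInnerN]
    have hband : PySem.Int.band (mask2 : Int) (bits : Int) = ((mask2 &&& bits : Nat) : Int) :=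
      PySem.Int.band_natCast mask2 bits
    have hcond : (0 < PySem.Int.band (mask2 : Int) (bits : Int)) ↔ 0 < mask2 &&& bits := by
      rw [hband]; exact_mod_cast Iff.rfl
    have hbits1 :
        (if 0 < PySem.Int.band (mask2 : Int) (bits : Int)
          then PySem.Int.bxor (bits : Int) (irr2 : Int) else (bits : Int))
        = (((if 0 < mask2 &&& bits then bits ^^^ irr2 else bits) : Nat) : Int) := by
      by_cases hc : 0 < mask2 &&& bits
      · rw [if_pos (hcond.mpr hc), if_pos hc]; exact PySem.Int.bxor_natCast bits irr2
      · rw [if_neg (fun hh => hc (hcond.mp hh)), if_neg hc]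
    rw [hbits1]
    set bits1 : Nat := if 0 < mask2 &&& bits then bits ^^^ irr2 else bits with hb1
    have hshr : ((bits1 : Nat) : Int) >>> rsh = ((bits1 >>> rsh : Nat) : Int) :=
      (Int.natCast_shiftRight bits1 rsh).symm
    rw [hshr]
    have hlen : ((tbl.map (fun (x : Nat) => (x : Int))).length : Int) = ((tbl.length : Nat) : Int) := by
      simp
    rw [hlen]
    have hcond2 : (((bits1 >>> rsh : Nat) : Int) < ((tbl.length : Nat) : Int))
        ↔ bits1 >>> rsh < tbl.length := by exact_mod_cast Iff.rfl
    by_cases hs : bits1 >>> rsh < tbl.length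
    · rw [if_pos (hcond2.mpr hs), if_pos hs]
      rw [List.map_append]
      congr 1
      have hget : PySem.List.pyGetD (tbl.map (fun (x : Nat) => (x : Int))) ((bits1 >>> rsh : Nat) : Int) 0
          = ((tbl.getD (bits1 >>> rsh) 0 : Nat) : Int) := by
        rw [PySem.List.pyGetD_natCast]
        exact (List.getD_map tbl 0 (fun (x : Nat) => (x : Int)))
      rw [hget, PySem.Int.band_natCast, PySem.Int.bxor_natCast]
      simp
    · rw [if_neg (fun hh => hs (hcond2.mp hh)), if_neg hs]
      rw [← Int.natCast_shiftRight mask2 1, ← Int.natCast_shiftRight irr2 1]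
      exact ih bits1 (mask2 >>> 1) (irr2 >>> 1) tbl

-- A's inner loop appends exactly pvF P d n
theorem pvInnerN_spec {P d : Nat} (h1 : 2 ^ d ≤ P) (h2 : P < 2 ^ (d + 1)) :
    ∀ (j n bits : Nat), 1 ≤ j → 1 ≤ n → bits < 2 ^ (d + j) →
      pvPM P d bits = pvF P d n →
      pvInnerN d (2 ^ d - 1) j bits (2 ^ (d + j - 1)) (P <<< (j - 1))
          ((List.range n).map (pvF P d))
        = (List.range (n + 1)).map (pvF P d) := by
  intro j
  induction j with
  | zero => intro n bits hj; omega
  | succ j ih =>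
    intro n bits _ hn hb hpm
    rw [pvInnerN]
    have hj1 : d + (j + 1) - 1 = d + j := by omega
    rw [hj1]
    -- the conditional top-bit elimination
    have hkey : (if 0 < 2 ^ (d + j) &&& bits then bits ^^^ P <<< ((j + 1) - 1) else bits)
          < 2 ^ (d + j)
        ∧ pvPM P d (if 0 < 2 ^ (d + j) &&& bits then bits ^^^ P <<< ((j + 1) - 1) else bits)
          = pvF P d n := by
      have hP0 : P ≠ 0 := by have := Nat.two_pow_pos d; omega
      have hsle : 2 ^ (d + j) ≤ P <<< j := by
        rw [Nat.shiftLeft_eq]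
        calc 2 ^ (d + j) = 2 ^ d * 2 ^ j := by rw [Nat.pow_add]
        _ ≤ P * 2 ^ j := Nat.mul_le_mul_right _ h1
      have hslt : P <<< j < 2 ^ (d + j + 1) := by
        rw [Nat.shiftLeft_eq]
        calc P * 2 ^ j < 2 ^ (d + 1) * 2 ^ j :=
          (Nat.mul_lt_mul_right (Nat.two_pow_pos j)).mpr h2
        _ = 2 ^ (d + j + 1) := by rw [← Nat.pow_add]; ring_nf
      by_cases hc : 0 < 2 ^ (d + j) &&& bits
      · rw [if_pos hc]
        have htb : bits.testBit (d + j) = true := by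
          rw [← pv_and_two_pow_pos_iff]
          rwa [Nat.and_comm]
        have hge : 2 ^ (d + j) ≤ bits := Nat.ge_two_pow_of_testBit htb
        constructor
        · rw [Nat.add_sub_cancel]
          exact pv_xor_top_cancel hge (by rw [show d + j + 1 = d + (j+1) by omega]; exact hb)
            hsle hslt
        · rw [Nat.add_sub_cancel, pvPM_xor_shift h1 h2, hpm]
      · rw [if_neg hc]
        have htb : bits.testBit (d + j) = false := by
          rw [Nat.and_comm] at hc
          cases hh : bits.testBit (d + j)
          · rfl
          · exact absurd ((pv_and_two_pow_pos_iff bits (d + j)).mpr hh) hc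
        exact ⟨pv_testBit_false_lt (by rw [show d + j + 1 = d + (j+1) by omega]; exact hb) htb,
          hpm⟩
    set bits1 := if 0 < 2 ^ (d + j) &&& bits then bits ^^^ P <<< ((j + 1) - 1) else bits
      with hb1
    obtain ⟨hblt, hbpm⟩ := hkey
    have hlen : ((List.range n).map (pvF P d)).length = n := by simp
    have hrs : bits1 >>> d = bits1 / 2 ^ d := Nat.shiftRight_eq_div_pow bits1 d
    by_cases hs : bits1 >>> d < ((List.range n).map (pvF P d)).length
    · rw [if_pos hs]
      rw [hlen] at hs
      -- the appended element equals pvF P d n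
      have hgd : ((List.range n).map (pvF P d)).getD (bits1 >>> d) 0 = pvF P d (bits1 >>> d) :=
        PySem.List.getD_map_range (pvF P d) n (bits1 >>> d) 0 hs
      have hmask : bits1 &&& (2 ^ d - 1) = bits1 % 2 ^ d := Nat.and_two_pow_sub_one_eq_mod bits1 d
      have hml : bits1 % 2 ^ d < 2 ^ d := Nat.mod_lt _ (Nat.two_pow_pos d)
      have hdecomp : bits1 = (bits1 >>> d) * 2 ^ d ^^^ bits1 % 2 ^ d := by
        rw [← Nat.shiftLeft_eq, pv_shl_xor_low hml, Nat.shiftLeft_eq, hrs, Nat.div_add_mod']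
      have hval : pvF P d n = bits1 % 2 ^ d ^^^ pvF P d (bits1 >>> d) := by
        rw [← hbpm]
        conv_lhs => rw [hdecomp]
        rw [pvPM_xor_left h1 h2]
        have : pvPM P d ((bits1 >>> d) * 2 ^ d) = pvF P d (bits1 >>> d) := rfl
        rw [this, Nat.xor_comm]
        exact pvPM_small (Nat.xor_lt_two_pow hml (pvPM_lt h1 h2 _))
      rw [hgd, hmask, ← hval, List.range_succ]
      simp
    · rw [if_neg hs]
      rw [hlen] at hs
      -- no break: s ≥ n ≥ 1 forces j ≥ 1, recurse
      have hs1 : 1 ≤ bits1 >>> d := by omega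
      have hj0 : 1 ≤ j := by
        by_contra hj0
        have hj0' : j = 0 := by omega
        have : bits1 < 2 ^ d := by rw [hj0'] at hblt; simpa using hblt
        have : bits1 >>> d = 0 := by rw [hrs]; exact Nat.div_eq_of_lt this
        omega
      have hm2 : 2 ^ (d + j) >>> 1 = 2 ^ (d + j - 1) := by
        rw [Nat.shiftRight_eq_div_pow, Nat.pow_one, ← Nat.pow_one 2,
          Nat.pow_div (by omega) (by norm_num), Nat.pow_one]
      have hi2 : P <<< ((j + 1) - 1) >>> 1 = P <<< (j - 1) := by
        rw [Nat.add_sub_cancel, Nat.shiftLeft_eq, Nat.shiftLeft_eq,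
          Nat.shiftRight_eq_div_pow, Nat.pow_one]
        conv_lhs => rw [show j = j - 1 + 1 by omega]
        rw [Nat.pow_succ, ← Nat.mul_assoc, Nat.mul_div_cancel _ (by norm_num)]
      rw [hm2, hi2]
      exact ih n bits1 hj0 hn (by rw [show d + j = d + j - 1 + 1 by omega] at hblt; omega) hbpm

-- generic outer-fold builder
theorem pv_foldl_build {α : Type} (g : List α → Int → List α) (F : Nat → α)
    (hg : ∀ n : Nat, 1 ≤ n → g ((List.range n).map F) (n : Int) = (List.range (n + 1)).map F) :
    ∀ M : Nat, 1 ≤ M →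
      (PySem.List.pyRange 1 (M : Int) 1).foldl g ((List.range 1).map F)
        = (List.range M).map F := by
  intro M
  induction M with
  | zero => omega
  | succ M ih =>
    intro _
    by_cases hM : 1 ≤ M
    · have hsplit : PySem.List.pyRange 1 ((M + 1 : Nat) : Int) 1
          = PySem.List.pyRange 1 (M : Int) 1 ++ [(M : Int)] := by
        push_cast
        exact PySem.List.pyRange_one_succ_right (by exact_mod_cast hM)
      rw [hsplit, List.foldl_append, ih hM, List.foldl_cons, List.foldl_nil, hg M hM]
    · have hM0 : M = 0 := by omega
      subst hM0
      have hnil : PySem.List.pyRange 1 ((1 : Nat) : Int) 1 = [] :=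
        PySem.List.pyRange_one_eq_nil (by norm_num)
      rw [show ((0 + 1 : Nat) : Int) = ((1 : Nat) : Int) by norm_num, hnil, List.foldl_nil]

theorem portA_eq (P : Nat) (hP : 1 ≤ P) (step : Int) (_hs : 0 ≤ step) :
    compute_incoming_table3_3 (P : Int) step
      = (List.range (2 ^ step.toNat)).map (fun n => (pvF P (pvBL P - 1) n : Int)) := by
  have hP0 : P ≠ 0 := by omega
  set d := pvBL P - 1 with hd
  have hdP : pvBL P = d + 1 := by have := pvBL_pos hP0; omega
  have h1 : 2 ^ d ≤ P := pvBL_le hP0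
  have h2 : P < 2 ^ (d + 1) := by rw [← hdP]; exact pvBL_lt P
  have hBLP : PySem.Int.bitLength ((P : Nat) : Int) = d + 1 := hdP
  simp only [compute_incoming_table3_3]
  rw [hBLP, Nat.add_sub_cancel]
  have hMcast : (2 : Int) ^ step.toNat = ((2 ^ step.toNat : Nat) : Int) := by push_cast; rfl
  rw [hMcast]
  have hinit : ([0] : List Int) = (List.range 1).map (fun n => (pvF P d n : Int)) := by
    simp [pvF_zero]
  rw [hinit]
  apply pv_foldl_build _ _ _ _ (Nat.one_le_two_pow)
  intro n hn
  beta_reduce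
  have hn0 : n ≠ 0 := by omega
  -- evaluate one outer iteration of A on the table for 0..n-1
  have hshl : ((n : Nat) : Int) <<< d = (((n <<< d : Nat)) : Int) := by exact_mod_cast rfl
  rw [hshl]
  have hbits : (n <<< d : Nat) = n * 2 ^ d := Nat.shiftLeft_eq n d
  have hBLbits : PySem.Int.bitLength (((n <<< d : Nat) : Nat) : Int) = pvBL n + d := by
    show pvBL (n <<< d) = pvBL n + d
    rw [hbits]; exact pvBL_mul_pow hn0 d
  rw [hBLbits]
  have hfuel : pvBL n + d - (d + 1) + 1 = pvBL n := by have := pvBL_pos hn0; omega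
  rw [hfuel]
  have hirr2 : ((P : Nat) : Int) <<< (pvBL n + d - (d + 1))
      = ((P <<< (pvBL n - 1) : Nat) : Int) := by
    rw [show pvBL n + d - (d + 1) = pvBL n - 1 by omega]
    exact_mod_cast rfl
  rw [hirr2]
  have hmask2 : (1 : Int) <<< (pvBL n + d - 1) = ((2 ^ (d + pvBL n - 1) : Nat) : Int) := by
    rw [show pvBL n + d - 1 = d + pvBL n - 1 by omega]
    rw [show (2 ^ (d + pvBL n - 1) : Nat) = 1 <<< (d + pvBL n - 1) by
      rw [Nat.shiftLeft_eq, Nat.one_mul]]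
    exact_mod_cast rfl
  rw [hmask2]
  have hmask1 : ((1 : Int) <<< d) - 1 = ((2 ^ d - 1 : Nat) : Int) := by
    have : (1 : Int) <<< d = ((2 ^ d : Nat) : Int) := by
      rw [show (2 ^ d : Nat) = 1 <<< d by rw [Nat.shiftLeft_eq, Nat.one_mul]]
      exact_mod_cast rfl
    rw [this]
    have := Nat.two_pow_pos d
    push_cast [Nat.cast_sub (by omega : 1 ≤ 2 ^ d)]
    ring
  rw [hmask1]
  have hmapmap : ∀ m : Nat, (List.range m).map (fun x => (pvF P d x : Int))
      = ((List.range m).map (pvF P d)).map (fun (x : Nat) => (x : Int)) := by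
    intro m; rw [List.map_map]; rfl
  rw [hmapmap n, hmapmap (n + 1)]
  rw [pvInnerA_bridge]
  congr 1
  exact pvInnerN_spec h1 h2 (pvBL n) n (n <<< d) (pvBL_pos hn0) hn
    (by rw [hbits, show d + pvBL n = pvBL n + d by omega, Nat.pow_add]
        exact (Nat.mul_lt_mul_right (Nat.two_pow_pos d)).mpr (pvBL_lt n))
    (by rw [hbits]; rfl)

theorem portB_eq (P : Nat) (hP : 1 ≤ P) (step : Int) (_hs : 0 ≤ step) :
    compute_incoming_table3_3_alt (P : Int) step
      = (List.range (2 ^ step.toNat)).map (fun n => (pvF P (pvBL P - 1) n : Int)) := by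
  have hP0 : P ≠ 0 := by omega
  set d := pvBL P - 1 with hd
  have hdP : pvBL P = d + 1 := by have := pvBL_pos hP0; omega
  have h1 : 2 ^ d ≤ P := pvBL_le hP0
  have h2 : P < 2 ^ (d + 1) := by rw [← hdP]; exact pvBL_lt P
  have hBLP : PySem.Int.bitLength ((P : Nat) : Int) = d + 1 := hdP
  simp only [compute_incoming_table3_3_alt]
  rw [hBLP, Nat.add_sub_cancel]
  have hMcast : (2 : Int) ^ step.toNat = ((2 ^ step.toNat : Nat) : Int) := by push_cast; rfl
  rw [hMcast]
  have htop : (1 : Int) <<< d = ((2 ^ d : Nat) : Int) := by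
    rw [show (2 ^ d : Nat) = 1 <<< d by rw [Nat.shiftLeft_eq, Nat.one_mul]]
    exact_mod_cast rfl
  have hmask1 : ((2 ^ d : Nat) : Int) - 1 = ((2 ^ d - 1 : Nat) : Int) := by
    have := Nat.two_pow_pos d
    push_cast [Nat.cast_sub (by omega : 1 ≤ 2 ^ d)]
    ring
  rw [htop, hmask1]
  have hlowrow : PySem.Int.band ((P : Nat) : Int) ((2 ^ d - 1 : Nat) : Int)
      = ((P % 2 ^ d : Nat) : Int) := by
    rw [PySem.Int.band_natCast, Nat.and_two_pow_sub_one_eq_mod]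
  rw [hlowrow]
  have hinit : ([0] : List Int) = (List.range 1).map (fun n => (pvF P d n : Int)) := by
    simp [pvF_zero]
  rw [hinit]
  apply pv_foldl_build _ _ _ _ (Nat.one_le_two_pow)
  intro n hn
  beta_reduce
  have hn0 : n ≠ 0 := by omega
  have hfm : pvF P d (n / 2) < 2 ^ d := pvPM_lt h1 h2 _
  -- the table lookup: table[n >> 1] = pvF (n / 2)
  have hshr : ((n : Nat) : Int) >>> (1 : Nat) = ((n / 2 : Nat) : Int) := by
    rw [show (n / 2 : Nat) = n >>> 1 by
      rw [Nat.shiftRight_eq_div_pow, Nat.pow_one]]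
    exact (Int.natCast_shiftRight n 1).symm
  rw [hshr]
  have hget : PySem.List.pyGetD ((List.range n).map (fun x => (pvF P d x : Int)))
      ((n / 2 : Nat) : Int) 0 = ((pvF P d (n / 2) : Nat) : Int) := by
    rw [PySem.List.pyGetD_natCast]
    rw [show (List.range n).map (fun x => (pvF P d x : Int))
        = ((List.range n).map (pvF P d)).map (fun (x : Nat) => (x : Int)) by
      rw [List.map_map]; rfl]
    rw [show (0 : Int) = ((0 : Nat) : Int) from rfl,
      List.getD_map ((List.range n).map (pvF P d)) 0 (fun (x : Nat) => (x : Int))]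
    congr 1
    exact PySem.List.getD_map_range (pvF P d) n (n / 2) 0
      (Nat.div_lt_self (by omega) (by norm_num))
  rw [hget]
  have hshl : ((pvF P d (n / 2) : Nat) : Int) <<< (1 : Nat)
      = ((2 * pvF P d (n / 2) : Nat) : Int) := by
    rw [show (2 * pvF P d (n / 2) : Nat) = pvF P d (n / 2) <<< 1 by
      rw [Nat.shiftLeft_eq, Nat.pow_one, Nat.mul_comm]]
    exact_mod_cast rfl
  rw [hshl]
  set t0 : Nat := 2 * pvF P d (n / 2) with ht0
  have ht0lt : t0 < 2 ^ (d + 1) := by rw [Nat.pow_succ]; omega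
  -- first conditional: t & top ≠ 0  ↔  2^d ≤ t0
  have hcond1 : PySem.Int.band ((t0 : Nat) : Int) ((2 ^ d : Nat) : Int) ≠ 0 ↔ 2 ^ d ≤ t0 := by
    rw [PySem.Int.band_natCast]
    constructor
    · intro hne
      have hpos : 0 < t0 &&& 2 ^ d := by
        rcases Nat.eq_zero_or_pos (t0 &&& 2 ^ d) with h0 | hp
        · rw [h0] at hne; simp at hne
        · exact hp
      exact Nat.ge_two_pow_of_testBit ((pv_and_two_pow_pos_iff t0 d).mp hpos)
    · intro hge
      have : t0.testBit d = true :=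
        Nat.testBit_of_two_pow_le_and_two_pow_add_one_gt hge ht0lt
      have hpos := (pv_and_two_pow_pos_iff t0 d).mpr this
      exact_mod_cast Nat.pos_iff_ne_zero.mp hpos
  -- second conditional: n & 1 ≠ 0  ↔  n % 2 = 1
  have hcond2 : PySem.Int.band ((n : Nat) : Int) 1 ≠ 0 ↔ n % 2 = 1 := by
    rw [show (1 : Int) = ((1 : Nat) : Int) from rfl, PySem.Int.band_natCast,
      Nat.and_one_is_mod]
    constructor
    · intro hne
      rcases Nat.mod_two_eq_zero_or_one n with h0 | h1'
      · rw [h0] at hne; simp at hne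
      · exact h1'
    · intro h1'; rw [h1']; norm_num
  rw [List.range_succ, List.map_append]
  congr 1
  simp only [List.map_cons, List.map_nil]
  congr 1
  rw [pvF_rec h1 h2 n]
  simp only
  rw [← ht0]
  by_cases hc2 : n % 2 = 1
  · rw [if_pos (hcond2.mpr hc2), if_pos hc2]
    by_cases hc1 : 2 ^ d ≤ t0
    · rw [if_pos (hcond1.mpr hc1), if_pos hc1, PySem.Int.bxor_natCast,
        PySem.Int.bxor_natCast]
    · rw [if_neg (fun hh => hc1 (hcond1.mp hh)), if_neg hc1, PySem.Int.bxor_natCast]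
  · rw [if_neg (fun hh => hc2 (hcond2.mp hh)), if_neg hc2]
    by_cases hc1 : 2 ^ d ≤ t0
    · rw [if_pos (hcond1.mpr hc1), if_pos hc1, PySem.Int.bxor_natCast]
    · rw [if_neg (fun hh => hc1 (hcond1.mp hh)), if_neg hc1]

-- ===== VERDICT (by name: the statement is the Claim_ definition above) =====
theorem compute_incoming_table3_3_spec : Claim_equal_compute_incoming_table3_3 := by
  intro irr step _ hpre
  obtain ⟨h1, h2⟩ := hpre
  have hirr : irr = ((irr.toNat : Nat) : Int) := by omega
  unfold Spec_compute_incoming_table3_3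
  rw [hirr, portA_eq irr.toNat (by omega) step h2, portB_eq irr.toNat (by omega) step h2]
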